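-- pv_equiv track=rewrite | github.com/quantik-git/Laboratorios-Algoritmia-II | treino02/cidade.py | build
-- ===== SOURCE A (Python) =====
-- def build(ruas):
--     adj = {}
--     for rua in ruas:
--         o = rua[0]
--         d = rua[-1]
--         p = len(rua)
--
--         if o not in adj:
--             adj[o] = {}
--         if d not in adj:
--             adj[d] = {}
--
--         if(d in adj[o] and p > adj[o][d]):
--             continue;
--
--         adj[o][d] = p
--         adj[d][o] = p
--     return adj
-- ===== SOURCE B (Python) =====
-- def build(ruas):
--     # Declarative recomputation: no mutable adjacency state; each entry of the
--     # result is computed independently (first-seen orders + min over matches).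
--     ends = [(rua[0], rua[-1]) for rua in ruas]
--
--     def first_seen(seq):
--         out = []
--         for v in seq:
--             if v not in out:
--                 out.append(v)
--         return out
--
--     nodes = first_seen(v for od in ends for v in od)
--
--     def neighbours(x):
--         return first_seen(d if o == x else o for o, d in ends if o == x or d == x)
--
--     def shortest(x, y):
--         return min(len(rua) for rua, (o, d) in zip(ruas, ends)
--                    if (o == x and d == y) or (o == y and d == x))
--
--     return {x: {y: shortest(x, y) for y in neighbours(x)} for x in nodes}
-- ===== Notes on version B (the rewrite author's own statement) =====
-- stated objective: alternative
-- what changed: A builds the nested adjacency by one stateful pass that mutates dicts with a skip-if-longer branch; B is declarative and stateless: it computes endpoint pairs once, derives the outer/inner key orders as first-seen dedups, and computes each weight independently as min() over all matching streets (O(n^2) recomputation instead of O(n) mutation).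
import Mathlib
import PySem

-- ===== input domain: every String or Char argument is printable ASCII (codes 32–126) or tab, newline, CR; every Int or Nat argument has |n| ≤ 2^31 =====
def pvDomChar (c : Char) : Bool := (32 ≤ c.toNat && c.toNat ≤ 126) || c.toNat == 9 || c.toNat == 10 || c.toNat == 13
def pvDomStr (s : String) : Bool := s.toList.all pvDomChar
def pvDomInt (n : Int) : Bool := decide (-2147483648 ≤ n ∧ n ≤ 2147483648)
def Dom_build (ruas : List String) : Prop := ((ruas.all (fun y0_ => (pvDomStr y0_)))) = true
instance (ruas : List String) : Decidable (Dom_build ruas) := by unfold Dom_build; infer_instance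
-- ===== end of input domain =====

-- B replaces A's single stateful pass (mutating nested dicts with a skip-if-longer branch) by a
-- stateless declarative computation: first-seen key orders plus an independent min() per pair
-- (objective: alternative; B recomputes, so it is not faster).

-- ===== PORT A =====
def pvStepA (adj : PySem.Dict String (PySem.Dict String Int)) (rua : String) :
    PySem.Dict String (PySem.Dict String Int) :=
  let o : String := String.ofList [PySem.List.pyGetD rua.toList 0 ' ']   -- rua[0]   (Pre_: rua ≠ "")
  let d : String := String.ofList [PySem.List.pyGetD rua.toList (-1) ' ']-- rua[-1]  (Pre_: rua ≠ "")
  let p : Int := (rua.toList.length : Int)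
  let adj1 := if adj.contains o then adj else adj.insert o PySem.Dict.empty
  let adj2 := if adj1.contains d then adj1 else adj1.insert d PySem.Dict.empty
  let inner := adj2.getD o PySem.Dict.empty
  if inner.contains d ∧ p > inner.getD d 0 then adj2
  else
    let adj3 := adj2.insert o ((adj2.getD o PySem.Dict.empty).insert d p)
    adj3.insert d ((adj3.getD d PySem.Dict.empty).insert o p)

def build (ruas : List String) : List (String × List (String × Int)) :=
  ((ruas.foldl pvStepA PySem.Dict.empty).items).map (fun q => (q.1, q.2.items))

-- ===== PORT B =====
-- ends = [(rua[0], rua[-1]) for rua in ruas]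
def pvEndsOf (rua : String) : String × String :=
  (String.ofList [PySem.List.pyGetD rua.toList 0 ' '],
   String.ofList [PySem.List.pyGetD rua.toList (-1) ' '])   -- (Pre_: rua ≠ "")

-- first_seen: keep the first occurrence of each value, in order
def pvFS {α : Type} [DecidableEq α] (out : List α) (v : α) : List α :=
  if v ∈ out then out else out ++ [v]

def pvFirstSeen {α : Type} [DecidableEq α] (xs : List α) : List α :=
  xs.foldl pvFS []

def pvNodes (ends : List (String × String)) : List String :=
  pvFirstSeen (ends.flatMap (fun od => [od.1, od.2]))

def pvNeighbours (ends : List (String × String)) (x : String) : List String :=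
  pvFirstSeen (ends.filterMap (fun od =>
    if od.1 = x ∨ od.2 = x then some (if od.1 = x then od.2 else od.1) else none))

-- min over the (provably nonempty, for y ∈ neighbours) matching lengths; the getD 0 is unreachable
def pvShortest (ruas : List String) (ends : List (String × String)) (x y : String) : Int :=
  (PySem.List.min? ((ruas.zip ends).filterMap (fun rp =>
      if (rp.2.1 = x ∧ rp.2.2 = y) ∨ (rp.2.1 = y ∧ rp.2.2 = x)
      then some ((rp.1.toList.length : Int)) else none)) (fun v => v)).getD 0

def build_alt (ruas : List String) : List (String × List (String × Int)) :=
  let ends := ruas.map pvEndsOf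
  (pvNodes ends).map (fun x =>
    (x, (pvNeighbours ends x).map (fun y => (y, pvShortest ruas ends x y))))

-- ===== PRECONDITION & SPEC =====
-- Pre_ excludes lists containing the empty street "", on which the Python A raises IndexError
-- at rua[0] (B raises there too).
def Pre_build (ruas : List String) : Prop := ∀ r ∈ ruas, r ≠ ""
instance (ruas : List String) : Decidable (Pre_build ruas) := by unfold Pre_build; infer_instance
def pvWitness_build : List String := ["ab", "bca", "aa"]

def Spec_build (ruas : List String) (out : List (String × List (String × Int))) : Prop := out = build_alt ruas
instance (ruas : List String) (out : List (String × List (String × Int))) : Decidable (Spec_build ruas out) := by unfold Spec_build; infer_instance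

-- ===== CLAIM (what is proved, stated in full; the proofs are below) =====
def Claim_equal_build : Prop := ∀ (ruas : List String), Dom_build ruas → Pre_build ruas → Spec_build ruas (build ruas)

-- ===== LEMMAS AND PROOFS =====

-- proof-internal intermediate form: A's fold is first related to a (first-seen order, min table)
-- pair, then that pair is related to B's declarative form.
def pvPairKey (o d : String) : String × String := if o ≤ d then (o, d) else (d, o)

def pvStepB (st : PySem.Dict String Unit × PySem.Dict (String × String) Int) (rua : String) :
    PySem.Dict String Unit × PySem.Dict (String × String) Int :=
  let o : String := String.ofList [PySem.List.pyGetD rua.toList 0 ' ']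
  let d : String := String.ofList [PySem.List.pyGetD rua.toList (-1) ' ']
  let p : Int := (rua.toList.length : Int)
  let order := st.1
  let pairs := st.2
  let order1 := if order.contains o then order else order.insert o ()
  let order2 := if order1.contains d then order1 else order1.insert d ()
  let k := pvPairKey o d
  let pairs1 := if ¬ pairs.contains k ∨ p < pairs.getD k 0 then pairs.insert k p else pairs
  (order2, pairs1)

def pvEmitStep (adj : PySem.Dict String (PySem.Dict String Int))
    (item : (String × String) × Int) : PySem.Dict String (PySem.Dict String Int) :=
  let x := item.1.1
  let y := item.1.2
  let p := item.2
  let adj1 := adj.insert x ((adj.getD x PySem.Dict.empty).insert y p)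
  adj1.insert y ((adj1.getD y PySem.Dict.empty).insert x p)

-- the effect of one emitted pair on the inner dict that sits at outer key x
def pvWr (u v : String) (p : Int) (x : String) (w : PySem.Dict String Int) : PySem.Dict String Int :=
  if u = x then w.insert v p else if v = x then w.insert u p else w

def pvInner (x : String) (l : List ((String × String) × Int)) (w : PySem.Dict String Int) :
    PySem.Dict String Int :=
  l.foldl (fun w it => pvWr it.1.1 it.1.2 it.2 x w) w

def pvFromKeys (ks : List String) : PySem.Dict String (PySem.Dict String Int) :=
  ks.foldl (fun a x => a.insert x PySem.Dict.empty) PySem.Dict.empty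

def pvDictEmit (order : PySem.Dict String Unit) (pairs : PySem.Dict (String × String) Int) :
    PySem.Dict String (PySem.Dict String Int) :=
  pairs.items.foldl pvEmitStep (pvFromKeys order.keys)

def pvInv (order : PySem.Dict String Unit) (pairs : PySem.Dict (String × String) Int) : Prop :=
  order.keys.Nodup ∧ (pairs.items.map (·.1)).Nodup ∧
  (∀ it ∈ pairs.items, it.1.1 ≤ it.1.2 ∧ it.1.1 ∈ order.keys ∧ it.1.2 ∈ order.keys)

theorem pvWr_symm (u v : String) (p : Int) (x : String) (w : PySem.Dict String Int) :
    pvWr u v p x w = pvWr v u p x w := by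
  unfold pvWr
  by_cases hu : u = x <;> by_cases hv : v = x <;> simp [hu, hv]

theorem pvEmitStep_items (adj : PySem.Dict String (PySem.Dict String Int))
    (u v : String) (p : Int) (hnd : adj.keys.Nodup) (hu : u ∈ adj.keys) (hv : v ∈ adj.keys) :
    (pvEmitStep adj ((u, v), p)).items = adj.items.map (fun q => (q.1, pvWr u v p q.1 q.2)) := by
  have hcu : adj.contains u = true := (PySem.Dict.contains_iff_mem_keys adj u).mpr hu
  have hcv : adj.contains v = true := (PySem.Dict.contains_iff_mem_keys adj v).mpr hv
  unfold pvEmitStep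
  simp only
  by_cases huv : u = v
  · subst huv
    have hWu : (adj.insert u ((adj.getD u PySem.Dict.empty).insert u p)).getD u PySem.Dict.empty
        = (adj.getD u PySem.Dict.empty).insert u p := by
      rw [PySem.Dict.getD_eq_get?_getD, PySem.Dict.get?_insert_self]; rfl
    rw [hWu, PySem.Dict.insert_insert_self, PySem.Dict.insert_insert_self,
      PySem.Dict.items_insert_of_contains _ _ hcu]
    refine List.map_congr_left ?_
    intro q hq
    by_cases hqu : q.1 = u
    · have hg : adj.getD u PySem.Dict.empty = q.2 := by
        have : (u, q.2) ∈ adj.items := by rw [← hqu]; exact hq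
        exact PySem.Dict.getD_of_mem_items adj this hnd _
      simp [pvWr, hqu, hg]
    · simp [pvWr, hqu, Ne.symm hqu]
  · have hc1v : (adj.insert u ((adj.getD u PySem.Dict.empty).insert v p)).contains v = true := by
      rw [PySem.Dict.contains_insert]; simp [hcv]
    have hg1v : (adj.insert u ((adj.getD u PySem.Dict.empty).insert v p)).getD v PySem.Dict.empty
        = adj.getD v PySem.Dict.empty := by
      rw [PySem.Dict.getD_eq_get?_getD, PySem.Dict.get?_insert_of_ne _ _ (Ne.symm huv),
        ← PySem.Dict.getD_eq_get?_getD]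
    rw [hg1v, PySem.Dict.items_insert_of_contains _ _ hc1v,
      PySem.Dict.items_insert_of_contains _ _ hcu, List.map_map]
    refine List.map_congr_left ?_
    intro q hq
    by_cases hqu : q.1 = u
    · have hg : adj.getD u PySem.Dict.empty = q.2 := by
        have : (u, q.2) ∈ adj.items := by rw [← hqu]; exact hq
        exact PySem.Dict.getD_of_mem_items adj this hnd _
      simp [pvWr, Function.comp, hqu, huv, hg]
    · by_cases hqv : q.1 = v
      · have hg : adj.getD v PySem.Dict.empty = q.2 := by
          have : (v, q.2) ∈ adj.items := by rw [← hqv]; exact hq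
          exact PySem.Dict.getD_of_mem_items adj this hnd _
        simp [pvWr, Function.comp, hqv, hg, Ne.symm huv]
        exact fun h => absurd h huv
      · simp [pvWr, Function.comp, hqu, hqv, Ne.symm hqu, Ne.symm hqv]

theorem pvEmitStep_keys (adj : PySem.Dict String (PySem.Dict String Int))
    (u v : String) (p : Int) (hnd : adj.keys.Nodup) (hu : u ∈ adj.keys) (hv : v ∈ adj.keys) :
    (pvEmitStep adj ((u, v), p)).keys = adj.keys := by
  have h := pvEmitStep_items adj u v p hnd hu hv
  simp only [PySem.Dict.keys, h, List.map_map]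
  rfl

theorem pvEmit_items (l : List ((String × String) × Int))
    (adj : PySem.Dict String (PySem.Dict String Int)) (hnd : adj.keys.Nodup)
    (hend : ∀ it ∈ l, it.1.1 ∈ adj.keys ∧ it.1.2 ∈ adj.keys) :
    (l.foldl pvEmitStep adj).items = adj.items.map (fun q => (q.1, pvInner q.1 l q.2)) := by
  induction l generalizing adj with
  | nil => simp [pvInner]
  | cons it l' ih =>
    obtain ⟨⟨u, v⟩, p⟩ := it
    have hu := (hend ((u, v), p) (List.mem_cons_self)).1
    have hv := (hend ((u, v), p) (List.mem_cons_self)).2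
    have hk := pvEmitStep_keys adj u v p hnd hu hv
    have hnd' : (pvEmitStep adj ((u, v), p)).keys.Nodup := by rw [hk]; exact hnd
    have hend' : ∀ it ∈ l', it.1.1 ∈ (pvEmitStep adj ((u, v), p)).keys ∧
        it.1.2 ∈ (pvEmitStep adj ((u, v), p)).keys := by
      intro it hit; rw [hk]; exact hend it (List.mem_cons_of_mem _ hit)
    rw [List.foldl_cons, ih _ hnd' hend', pvEmitStep_items adj u v p hnd hu hv, List.map_map]
    rfl

theorem pvFromKeys_items (ks : List String) (hnd : ks.Nodup) :
    (pvFromKeys ks).items = ks.map (fun x => (x, (PySem.Dict.empty : PySem.Dict String Int))) := by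
  unfold pvFromKeys
  have := PySem.Dict.items_foldl_insert_fresh ks (fun x => x)
    (fun _ => (PySem.Dict.empty : PySem.Dict String Int)) PySem.Dict.empty
    (by intro a _; simp) (by simpa using hnd)
  simpa using this

theorem pvDictEmit_items (order : PySem.Dict String Unit) (pairs : PySem.Dict (String × String) Int)
    (h : pvInv order pairs) :
    (pvDictEmit order pairs).items =
      order.keys.map (fun x => (x, pvInner x pairs.items PySem.Dict.empty)) := by
  obtain ⟨hndO, hndP, hP⟩ := h
  unfold pvDictEmit
  have hfk := pvFromKeys_items order.keys hndO
  have hfkk : (pvFromKeys order.keys).keys = order.keys := by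
    show (pvFromKeys order.keys).items.map (·.1) = order.keys
    rw [hfk, List.map_map]; exact List.map_id _
  have hfknd : (pvFromKeys order.keys).keys.Nodup := by rw [hfkk]; exact hndO
  rw [pvEmit_items pairs.items (pvFromKeys order.keys) hfknd
    (by intro it hit; rw [hfkk]; exact ⟨(hP it hit).2.1, (hP it hit).2.2⟩), hfk, List.map_map]
  rfl

theorem pvDictEmit_keys (order : PySem.Dict String Unit) (pairs : PySem.Dict (String × String) Int)
    (h : pvInv order pairs) : (pvDictEmit order pairs).keys = order.keys := by
  simp only [PySem.Dict.keys, pvDictEmit_items order pairs h, List.map_map]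
  simp

theorem pvInner_of_no_endpoint (x : String) (l : List ((String × String) × Int))
    (w : PySem.Dict String Int) (h : ∀ it ∈ l, it.1.1 ≠ x ∧ it.1.2 ≠ x) :
    pvInner x l w = w := by
  induction l generalizing w with
  | nil => rfl
  | cons it l' ih =>
    have h1 := h it (List.mem_cons_self)
    have : pvWr it.1.1 it.1.2 it.2 x w = w := by simp [pvWr, h1.1, h1.2]
    simpa [pvInner, this] using ih w (fun it hit => h it (List.mem_cons_of_mem _ hit))

theorem pvInv_insert_order (order : PySem.Dict String Unit)
    (pairs : PySem.Dict (String × String) Int) (x : String) (h : pvInv order pairs)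
    (hx : x ∉ order.keys) : pvInv (order.insert x ()) pairs := by
  obtain ⟨hndO, hndP, hP⟩ := h
  have hcx : order.contains x = false := by
    rw [PySem.Dict.contains_eq_decide_mem_keys]; simpa using hx
  have hkeys' : (order.insert x ()).keys = order.keys ++ [x] :=
    PySem.Dict.keys_insert_of_not_contains order () hcx
  refine ⟨?_, hndP, ?_⟩
  · rw [hkeys']; simp [List.nodup_append, hndO]
    intro a ha h; exact hx (h ▸ ha)
  · intro it hit
    refine ⟨(hP it hit).1, ?_, ?_⟩ <;> rw [hkeys']
    · exact List.mem_append_left _ (hP it hit).2.1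
    · exact List.mem_append_left _ (hP it hit).2.2

-- new outer key: the emitted dict just gains an empty inner dict at the end
theorem pvDictEmit_insert_order (order : PySem.Dict String Unit)
    (pairs : PySem.Dict (String × String) Int) (x : String) (h : pvInv order pairs)
    (hx : x ∉ order.keys) :
    pvDictEmit (order.insert x ()) pairs = (pvDictEmit order pairs).insert x PySem.Dict.empty := by
  obtain ⟨hndO, hndP, hP⟩ := h
  have hcx : order.contains x = false := by
    rw [PySem.Dict.contains_eq_decide_mem_keys]; simpa using hx
  have hkeys' : (order.insert x ()).keys = order.keys ++ [x] :=
    PySem.Dict.keys_insert_of_not_contains order () hcx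
  have h' : pvInv (order.insert x ()) pairs := pvInv_insert_order order pairs x ⟨hndO, hndP, hP⟩ hx
  apply PySem.Dict.ext
  have hcx' : (pvDictEmit order pairs).contains x = false := by
    rw [PySem.Dict.contains_eq_decide_mem_keys, pvDictEmit_keys order pairs ⟨hndO, hndP, hP⟩]
    simpa using hx
  rw [PySem.Dict.items_insert_of_not_contains _ _ hcx',
    pvDictEmit_items _ _ h', pvDictEmit_items _ _ ⟨hndO, hndP, hP⟩, hkeys', List.map_append]
  have : pvInner x pairs.items PySem.Dict.empty = PySem.Dict.empty := by
    apply pvInner_of_no_endpoint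
    intro it hit
    exact ⟨fun hc => hx (hc ▸ (hP it hit).2.1), fun hc => hx (hc ▸ (hP it hit).2.2)⟩
  simp [this]

theorem pvInner_cons (x : String) (it : (String × String) × Int)
    (l : List ((String × String) × Int)) (w : PySem.Dict String Int) :
    pvInner x (it :: l) w = pvInner x l (pvWr it.1.1 it.1.2 it.2 x w) := rfl

theorem pvPairKey_of_le {u v : String} (h : u ≤ v) : pvPairKey u v = (u, v) := by
  simp [pvPairKey, h]

theorem pvPairKey_comm (x y : String) : pvPairKey x y = pvPairKey y x := by
  by_cases h1 : x ≤ y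
  · by_cases h2 : y ≤ x
    · simp [pvPairKey, le_antisymm h1 h2]
    · simp [pvPairKey, h1, h2]
  · have h2 : y ≤ x := (le_total x y).resolve_left h1
    simp [pvPairKey, h1, h2]

theorem pvPairKey_endpoint {u v x y : String} (huv : u ≤ v)
    (hcase : (u = x ∧ v = y) ∨ (v = x ∧ u = y)) : pvPairKey x y = (u, v) := by
  rcases hcase with ⟨h1, h2⟩ | ⟨h1, h2⟩
  · subst h1; subst h2; exact pvPairKey_of_le huv
  · subst h1; subst h2; rw [pvPairKey_comm]; exact pvPairKey_of_le huv

theorem pvInner_get?_of_not_mem (x y : String) (l : List ((String × String) × Int))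
    (w : PySem.Dict String Int) (hnorm : ∀ it ∈ l, it.1.1 ≤ it.1.2)
    (hk : pvPairKey x y ∉ l.map (·.1)) : (pvInner x l w).get? y = w.get? y := by
  induction l generalizing w with
  | nil => rfl
  | cons it l' ih =>
    obtain ⟨⟨u, v⟩, q⟩ := it
    have huv : u ≤ v := (hnorm _ List.mem_cons_self)
    have hk1 : pvPairKey x y ≠ (u, v) := by intro hc; exact hk (by simp [hc])
    have hstep : (pvWr u v q x w).get? y = w.get? y := by
      unfold pvWr
      by_cases hu : u = x
      · rw [if_pos hu]
        exact PySem.Dict.get?_insert_of_ne _ _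
          (fun hyv => hk1 (pvPairKey_endpoint huv (Or.inl ⟨hu, hyv.symm⟩)))
      · rw [if_neg hu]
        by_cases hv : v = x
        · rw [if_pos hv]
          exact PySem.Dict.get?_insert_of_ne _ _
            (fun hyu => hk1 (pvPairKey_endpoint huv (Or.inr ⟨hv, hyu.symm⟩)))
        · rw [if_neg hv]
    rw [pvInner_cons, ih _ (fun it hit => hnorm it (List.mem_cons_of_mem _ hit))
      (fun hc => hk (by rw [List.map_cons]; exact List.mem_cons_of_mem _ hc)), hstep]

theorem pvInner_get?_of_mem (x y : String) (q : Int) (l : List ((String × String) × Int))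
    (w : PySem.Dict String Int) (hnorm : ∀ it ∈ l, it.1.1 ≤ it.1.2)
    (hnd : (l.map (·.1)).Nodup) (hm : (pvPairKey x y, q) ∈ l) :
    (pvInner x l w).get? y = some q := by
  induction l generalizing w with
  | nil => cases hm
  | cons it l' ih =>
    rcases List.mem_cons.mp hm with hm1 | hm1
    · have hfst : it.1 = pvPairKey x y := by rw [← hm1]
      have hrest : pvPairKey x y ∉ l'.map (·.1) := by
        have := hnd; rw [List.map_cons, List.nodup_cons] at this
        rw [← hfst]; exact this.1
      rw [pvInner_cons,
        pvInner_get?_of_not_mem x y l' _ (fun it hit => hnorm it (List.mem_cons_of_mem _ hit)) hrest]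
      rw [← hm1]
      unfold pvWr pvPairKey
      by_cases hxy : x ≤ y
      · simp [hxy, PySem.Dict.get?_insert_self]
      · have hyx : x ≠ y := fun hc => hxy (le_of_eq hc)
        simp [hxy, Ne.symm hyx, PySem.Dict.get?_insert_self]
    · rw [pvInner_cons]
      exact ih _ (fun it hit => hnorm it (List.mem_cons_of_mem _ hit))
        (by have := hnd; rw [List.map_cons, List.nodup_cons] at this; exact this.2) hm1

theorem pv_insert_comm (w : PySem.Dict String Int) (y z : String) (p q : Int)
    (hy : w.contains y = true) (hzy : z ≠ y) :
    (w.insert z q).insert y p = (w.insert y p).insert z q := by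
  have hy' : (w.insert z q).contains y = true := by rw [PySem.Dict.contains_insert]; simp [hy]
  by_cases hz : w.contains z = true
  · have hz' : (w.insert y p).contains z = true := by rw [PySem.Dict.contains_insert]; simp [hz]
    apply PySem.Dict.ext
    rw [PySem.Dict.items_insert_of_contains _ _ hy', PySem.Dict.items_insert_of_contains _ _ hz,
      PySem.Dict.items_insert_of_contains _ _ hz', PySem.Dict.items_insert_of_contains _ _ hy,
      List.map_map, List.map_map]
    refine List.map_congr_left ?_
    intro r _
    by_cases hry : r.1 = y <;> by_cases hrz : r.1 = z <;>
      simp [Function.comp, hry, hrz, hzy, Ne.symm hzy]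
  · have hz2 : w.contains z = false := by simpa using hz
    have hz' : (w.insert y p).contains z = false := by
      rw [PySem.Dict.contains_insert]; simp [hz2, hzy]
    apply PySem.Dict.ext
    rw [PySem.Dict.items_insert_of_contains _ _ hy', PySem.Dict.items_insert_of_not_contains _ _ hz2,
      PySem.Dict.items_insert_of_not_contains _ _ hz', PySem.Dict.items_insert_of_contains _ _ hy,
      List.map_append]
    simp [hzy]

theorem pvInner_insert_out (x y : String) (p : Int) (l : List ((String × String) × Int))
    (W : PySem.Dict String Int) (hnorm : ∀ it ∈ l, it.1.1 ≤ it.1.2)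
    (hk : pvPairKey x y ∉ l.map (·.1)) (hy : W.contains y = true) :
    pvInner x l (W.insert y p) = (pvInner x l W).insert y p := by
  induction l generalizing W with
  | nil => rfl
  | cons it l' ih =>
    obtain ⟨⟨u, v⟩, q⟩ := it
    have huv : u ≤ v := (hnorm _ List.mem_cons_self)
    have hk1 : pvPairKey x y ≠ (u, v) := by intro hc; exact hk (by simp [hc])
    have hcomm : pvWr u v q x (W.insert y p) = (pvWr u v q x W).insert y p := by
      unfold pvWr
      by_cases hu : u = x
      · rw [if_pos hu, if_pos hu]
        exact (pv_insert_comm W y v p q hy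
          (fun hvy => hk1 (pvPairKey_endpoint huv (Or.inl ⟨hu, hvy⟩)))).symm
      · rw [if_neg hu, if_neg hu]
        by_cases hv : v = x
        · rw [if_pos hv, if_pos hv]
          exact (pv_insert_comm W y u p q hy
            (fun huy => hk1 (pvPairKey_endpoint huv (Or.inr ⟨hv, huy⟩)))).symm
        · rw [if_neg hv, if_neg hv]
    have hy' : (pvWr u v q x W).contains y = true := by
      unfold pvWr; split_ifs <;> (try rw [PySem.Dict.contains_insert]) <;> simp [hy]
    rw [pvInner_cons, pvInner_cons, hcomm]
    exact ih _ (fun it hit => hnorm it (List.mem_cons_of_mem _ hit))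
      (fun hc => hk (by rw [List.map_cons]; exact List.mem_cons_of_mem _ hc)) hy'

def pvRep (k : String × String) (p : Int) (q : (String × String) × Int) :
    (String × String) × Int :=
  if q.1 == k then (k, p) else q

theorem pvRep_items (pairs : PySem.Dict (String × String) Int) (k : String × String) (p : Int)
    (hc : pairs.contains k = true) :
    (pairs.insert k p).items = pairs.items.map (pvRep k p) := by
  rw [PySem.Dict.items_insert_of_contains _ _ hc]
  rfl

theorem pvRep_fst (l : List ((String × String) × Int)) (k : String × String) (p : Int) :
    (l.map (pvRep k p)).map (·.1) = l.map (·.1) := by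
  rw [List.map_map]
  refine List.map_congr_left ?_
  intro q _
  by_cases h : q.1 = k <;> simp [pvRep, Function.comp, h]

theorem pvRep_id (l : List ((String × String) × Int)) (k : String × String) (p : Int)
    (hk : k ∉ l.map (·.1)) : l.map (pvRep k p) = l := by
  refine (List.map_congr_left ?_).trans (List.map_id _)
  intro q hq
  have : q.1 ≠ k := fun hc => hk (hc ▸ List.mem_map_of_mem hq)
  simp [pvRep, this]

theorem pvInner_rep_of_no_endpoint (x : String) (k : String × String) (p : Int)
    (l : List ((String × String) × Int)) (w : PySem.Dict String Int)
    (hx1 : k.1 ≠ x) (hx2 : k.2 ≠ x) :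
    pvInner x (l.map (pvRep k p)) w = pvInner x l w := by
  induction l generalizing w with
  | nil => rfl
  | cons it l' ih =>
    rw [List.map_cons, pvInner_cons, pvInner_cons]
    by_cases hit : it.1 = k
    · have h1 : pvRep k p it = (k, p) := by simp [pvRep, hit]
      have h2 : pvWr it.1.1 it.1.2 it.2 x w = w := by simp [pvWr, hit ▸ hx1, hit ▸ hx2]
      rw [h1, h2]
      have h3 : pvWr k.1 k.2 p x w = w := by simp [pvWr, hx1, hx2]
      rw [show pvWr (k, p).1.1 (k, p).1.2 (k, p).2 x w = w from h3]
      exact ih w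
    · rw [show pvRep k p it = it from by simp [pvRep, hit]]
      exact ih _

theorem pvInner_rep_of_endpoint (u v x : String) (p : Int) (huv : u ≤ v) (hx : u = x ∨ v = x)
    (l : List ((String × String) × Int)) (w : PySem.Dict String Int)
    (hnorm : ∀ it ∈ l, it.1.1 ≤ it.1.2) (hnd : (l.map (·.1)).Nodup)
    (hm : (u, v) ∈ l.map (·.1)) :
    pvInner x (l.map (pvRep (u, v) p)) w =
      (pvInner x l w).insert (if u = x then v else u) p := by
  have hkey : pvPairKey x (if u = x then v else u) = (u, v) := by
    by_cases hu : u = x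
    · rw [if_pos hu]; exact pvPairKey_endpoint huv (Or.inl ⟨hu, rfl⟩)
    · rw [if_neg hu]; exact pvPairKey_endpoint huv (Or.inr ⟨hx.resolve_left hu, rfl⟩)
  induction l generalizing w with
  | nil => cases hm
  | cons it l' ih =>
    rw [List.map_cons, pvInner_cons, pvInner_cons]
    by_cases hit : it.1 = (u, v)
    · have h1 : pvRep (u, v) p it = ((u, v), p) := by simp [pvRep, hit]
      rw [h1]
      have h2 : ∀ (q : Int) (w' : PySem.Dict String Int),
          pvWr u v q x w' = w'.insert (if u = x then v else u) q := by
        intro q w'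
        by_cases hu : u = x
        · simp [pvWr, hu]
        · simp [pvWr, hu, hx.resolve_left hu]
      have hnotin : (u, v) ∉ l'.map (·.1) := by
        rw [← hit]
        have := hnd; rw [List.map_cons, List.nodup_cons] at this; exact this.1
      rw [show pvWr ((u,v),p).1.1 ((u,v),p).1.2 ((u,v),p).2 x w
          = w.insert (if u = x then v else u) p from h2 p w]
      rw [show pvWr it.1.1 it.1.2 it.2 x w
          = w.insert (if u = x then v else u) it.2 from by
        rw [show it.1.1 = u from by rw [hit], show it.1.2 = v from by rw [hit]]; exact h2 it.2 w]
      rw [pvRep_id l' (u, v) p hnotin]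
      have hcy : (w.insert (if u = x then v else u) it.2).contains (if u = x then v else u)
          = true := by rw [PySem.Dict.contains_insert]; simp
      rw [← pvInner_insert_out x (if u = x then v else u) p l' _
        (fun it hit => hnorm it (List.mem_cons_of_mem _ hit)) (hkey ▸ hnotin) hcy,
        PySem.Dict.insert_insert_self]
    · rw [show pvRep (u, v) p it = it from by simp [pvRep, hit]]
      have hm' : (u, v) ∈ l'.map (·.1) := by
        rcases List.mem_cons.mp (by rw [List.map_cons] at hm; exact hm) with h1 | h1
        · exact absurd h1.symm hit
        · exact h1
      exact ih _ (fun it hit => hnorm it (List.mem_cons_of_mem _ hit))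
        (by have := hnd; rw [List.map_cons, List.nodup_cons] at this; exact this.2) hm'

theorem pvEmitStep_swap (X : PySem.Dict String (PySem.Dict String Int)) (o d : String) (p : Int)
    (hnd : X.keys.Nodup) (ho : o ∈ X.keys) (hd : d ∈ X.keys) :
    pvEmitStep X ((o, d), p) = pvEmitStep X ((d, o), p) := by
  apply PySem.Dict.ext
  rw [pvEmitStep_items X o d p hnd ho hd, pvEmitStep_items X d o p hnd hd ho]
  exact List.map_congr_left (fun q _ => by rw [pvWr_symm])

theorem pvPairKey_norm (o d : String) : (pvPairKey o d).1 ≤ (pvPairKey o d).2 := by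
  unfold pvPairKey
  split_ifs with h1
  · exact h1
  · exact (le_total o d).resolve_left h1

theorem pvInv_insert_pair (order : PySem.Dict String Unit)
    (pairs : PySem.Dict (String × String) Int) (o d : String) (p : Int)
    (h : pvInv order pairs) (ho : o ∈ order.keys) (hd : d ∈ order.keys) :
    pvInv order (pairs.insert (pvPairKey o d) p) := by
  obtain ⟨hndO, hndP, hP⟩ := h
  have hko : (pvPairKey o d).1 ∈ order.keys ∧ (pvPairKey o d).2 ∈ order.keys := by
    unfold pvPairKey; split_ifs <;> exact ⟨by assumption, by assumption⟩
  by_cases hc : pairs.contains (pvPairKey o d) = true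
  · refine ⟨hndO, ?_, ?_⟩
    · rw [pvRep_items pairs _ p hc, pvRep_fst]; exact hndP
    · intro it hit
      rw [pvRep_items pairs _ p hc] at hit
      rcases List.mem_map.mp hit with ⟨q, hq, hfq⟩
      by_cases hqk : q.1 = pvPairKey o d
      · have : it = (pvPairKey o d, p) := by rw [← hfq]; simp [pvRep, hqk]
        rw [this]
        exact ⟨pvPairKey_norm o d, hko.1, hko.2⟩
      · have : it = q := by rw [← hfq]; simp [pvRep, hqk]
        rw [this]
        exact hP q hq
  · have hc2 : pairs.contains (pvPairKey o d) = false := by simpa using hc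
    have hnm : pvPairKey o d ∉ pairs.items.map (·.1) := by
      intro hm
      rw [PySem.Dict.contains_eq_decide_mem_keys] at hc2
      simp only [PySem.Dict.keys, decide_eq_false_iff_not] at hc2
      exact hc2 hm
    refine ⟨hndO, ?_, ?_⟩
    · rw [PySem.Dict.items_insert_of_not_contains _ _ hc2, List.map_append, List.nodup_append]
      refine ⟨hndP, by simp, ?_⟩
      intro a ha b hb
      rcases List.mem_map.mp hb with ⟨q, hq, hfq⟩
      rw [List.mem_singleton] at hq
      subst hq
      intro hab
      exact hnm (by rw [show pvPairKey o d = a from by rw [hab, ← hfq]]; exact ha)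
    · intro it hit
      rw [PySem.Dict.items_insert_of_not_contains _ _ hc2] at hit
      rcases List.mem_append.mp hit with h1 | h1
      · exact hP it h1
      · have : it = (pvPairKey o d, p) := by simpa using h1
        rw [this]
        exact ⟨pvPairKey_norm o d, hko.1, hko.2⟩

-- fresh pair: emitting the appended pair is exactly A's symmetric write
theorem pvWrite_fresh (order : PySem.Dict String Unit) (pairs : PySem.Dict (String × String) Int)
    (o d : String) (p : Int) (h : pvInv order pairs) (ho : o ∈ order.keys) (hd : d ∈ order.keys)
    (hk : (pairs.contains (pvPairKey o d)) = false) :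
    pvEmitStep (pvDictEmit order pairs) ((o, d), p) =
      pvDictEmit order (pairs.insert (pvPairKey o d) p) := by
  have hkeys := pvDictEmit_keys order pairs h
  have hnd : (pvDictEmit order pairs).keys.Nodup := by rw [hkeys]; exact h.1
  have hEnd : pvDictEmit order (pairs.insert (pvPairKey o d) p) =
      pvEmitStep (pvDictEmit order pairs) (pvPairKey o d, p) := by
    unfold pvDictEmit
    rw [PySem.Dict.items_insert_of_not_contains _ _ hk, List.foldl_append, List.foldl_cons,
      List.foldl_nil]
  rw [hEnd]
  unfold pvPairKey
  by_cases hle : o ≤ d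
  · rw [if_pos hle]
  · rw [if_neg hle]
    exact pvEmitStep_swap _ o d p hnd (hkeys ▸ ho) (hkeys ▸ hd)

-- pair present: the in-place value update in the table is A's symmetric re-write
theorem pvWrite_update (order : PySem.Dict String Unit) (pairs : PySem.Dict (String × String) Int)
    (o d : String) (p v : Int) (h : pvInv order pairs) (ho : o ∈ order.keys) (hd : d ∈ order.keys)
    (hk : pairs.get? (pvPairKey o d) = some v) :
    pvEmitStep (pvDictEmit order pairs) ((o, d), p) =
      pvDictEmit order (pairs.insert (pvPairKey o d) p) := by
  have hc : pairs.contains (pvPairKey o d) = true := by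
    rw [PySem.Dict.contains_eq_isSome_get?, hk]; rfl
  have hI' : pvInv order (pairs.insert (pvPairKey o d) p) := pvInv_insert_pair order pairs o d p h ho hd
  have hkeys := pvDictEmit_keys order pairs h
  have hndX : (pvDictEmit order pairs).keys.Nodup := by rw [hkeys]; exact h.1
  have hmemk : (pvPairKey o d) ∈ pairs.items.map (·.1) :=
    List.mem_map_of_mem (PySem.Dict.mem_items_of_get?_eq_some pairs hk)
  have hknorm : (pvPairKey o d, v) ∈ pairs.items := PySem.Dict.mem_items_of_get?_eq_some pairs hk
  have hknrm : (pvPairKey o d).1 ≤ (pvPairKey o d).2 := (h.2.2 _ hknorm).1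
  have hkk : pvPairKey o d = (o, d) ∨ pvPairKey o d = (d, o) := by
    unfold pvPairKey; split_ifs <;> simp
  apply PySem.Dict.ext
  rw [pvEmitStep_items _ o d p hndX (hkeys ▸ ho) (hkeys ▸ hd),
    pvDictEmit_items order pairs h, pvDictEmit_items order (pairs.insert (pvPairKey o d) p) hI',
    pvRep_items pairs _ p hc, List.map_map]
  refine List.map_congr_left ?_
  intro x _
  simp only [Function.comp]
  by_cases hxod : x = o ∨ x = d
  · have hend : (pvPairKey o d).1 = x ∨ (pvPairKey o d).2 = x := by
      rcases hkk with h1 | h1 <;> rw [h1] <;> rcases hxod with h2 | h2 <;> simp [h2]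
    have hrep := pvInner_rep_of_endpoint (pvPairKey o d).1 (pvPairKey o d).2 x p hknrm hend
      pairs.items PySem.Dict.empty (fun it hit => (h.2.2 it hit).1) h.2.1 (by simpa using hmemk)
    have hwr : pvWr o d p x (pvInner x pairs.items PySem.Dict.empty) =
        (pvInner x pairs.items PySem.Dict.empty).insert
          (if (pvPairKey o d).1 = x then (pvPairKey o d).2 else (pvPairKey o d).1) p := by
      rcases hkk with h1 | h1 <;> rw [h1]
      · by_cases hox : o = x
        · simp [pvWr, hox]
        · have hdx : d = x := (hxod.resolve_left (fun hc' => hox hc'.symm)).symm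
          simp [pvWr, hox, hdx]
      · by_cases hox : o = x
        · by_cases hdx : d = x
          · simp [pvWr, hox, hdx]
          · simp [pvWr, hox, hdx]
        · have hdx : d = x := (hxod.resolve_left (fun hc' => hox hc'.symm)).symm
          simp [pvWr, hox, hdx]
    rw [hwr]
    exact congrArg (fun w => (x, w)) hrep.symm
  · rw [not_or] at hxod
    have h1 : (pvPairKey o d).1 ≠ x ∧ (pvPairKey o d).2 ≠ x := by
      rcases hkk with h1 | h1 <;> rw [h1] <;>
        exact ⟨fun hc' => (by simp_all), fun hc' => (by simp_all)⟩
    have hwr : pvWr o d p x (pvInner x pairs.items PySem.Dict.empty) =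
        pvInner x pairs.items PySem.Dict.empty := by
      have hox : o ≠ x := fun hc' => hxod.1 hc'.symm
      have hdx : d ≠ x := fun hc' => hxod.2 hc'.symm
      simp [pvWr, hox, hdx]
    rw [hwr, pvInner_rep_of_no_endpoint x (pvPairKey o d) p pairs.items PySem.Dict.empty h1.1 h1.2]

theorem pv_insert_same (pairs : PySem.Dict (String × String) Int) (k : String × String) (v : Int)
    (hnd : (pairs.items.map (·.1)).Nodup) (hk : pairs.get? k = some v) :
    pairs.insert k v = pairs := by
  have hc : pairs.contains k = true := by rw [PySem.Dict.contains_eq_isSome_get?, hk]; rfl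
  have hndk : pairs.keys.Nodup := by simp only [PySem.Dict.keys]; exact hnd
  apply PySem.Dict.ext
  rw [PySem.Dict.items_insert_of_contains _ _ hc]
  refine (List.map_congr_left ?_).trans (List.map_id _)
  intro q hq
  by_cases hqk : q.1 = k
  · have h1 : pairs.get? q.1 = some q.2 := PySem.Dict.get?_of_mem_items pairs (by simpa using hq) hndk
    rw [hqk, hk] at h1
    have h2 : q.2 = v := (Option.some_injective _ h1).symm
    simp only [hqk, beq_self_eq_true, if_true]
    rw [← hqk, ← h2]
    rfl
  · simp [hqk]

theorem pvPhase1 (order : PySem.Dict String Unit) (pairs : PySem.Dict (String × String) Int)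
    (x : String) (h : pvInv order pairs) :
    (if (pvDictEmit order pairs).contains x then pvDictEmit order pairs
      else (pvDictEmit order pairs).insert x PySem.Dict.empty) =
        pvDictEmit (if order.contains x then order else order.insert x ()) pairs ∧
    pvInv (if order.contains x then order else order.insert x ()) pairs ∧
    x ∈ (if order.contains x then order else order.insert x ()).keys ∧
    order.keys ⊆ (if order.contains x then order else order.insert x ()).keys := by
  have hck : (pvDictEmit order pairs).contains x = order.contains x := by
    rw [PySem.Dict.contains_eq_decide_mem_keys, PySem.Dict.contains_eq_decide_mem_keys,
      pvDictEmit_keys order pairs h]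
  by_cases hc : order.contains x = true
  · rw [hck, if_pos hc, if_pos hc]
    exact ⟨rfl, h, (PySem.Dict.contains_iff_mem_keys _ _).mp hc, fun a ha => ha⟩
  · have hc2 : order.contains x = false := by simpa using hc
    have hx : x ∉ order.keys := fun hm =>
      by rw [(PySem.Dict.contains_iff_mem_keys _ _).mpr hm] at hc2; cases hc2
    have hkeys' : (order.insert x ()).keys = order.keys ++ [x] :=
      PySem.Dict.keys_insert_of_not_contains order () hc2
    rw [hck, if_neg hc, if_neg hc]
    refine ⟨(pvDictEmit_insert_order order pairs x h hx).symm,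
      pvInv_insert_order order pairs x h hx, ?_, ?_⟩
    · rw [hkeys']; exact List.mem_append_right _ (List.mem_singleton_self x)
    · rw [hkeys']; exact fun a ha => List.mem_append_left _ ha

theorem pvStep_main (order : PySem.Dict String Unit) (pairs : PySem.Dict (String × String) Int)
    (rua : String) (h : pvInv order pairs) :
    pvStepA (pvDictEmit order pairs) rua =
      pvDictEmit (pvStepB (order, pairs) rua).1 (pvStepB (order, pairs) rua).2 ∧
    pvInv (pvStepB (order, pairs) rua).1 (pvStepB (order, pairs) rua).2 := by
  unfold pvStepA pvStepB
  dsimp only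
  generalize String.ofList [PySem.List.pyGetD rua.toList 0 ' '] = o
  generalize String.ofList [PySem.List.pyGetD rua.toList (-1) ' '] = d
  generalize ((rua.toList.length : Int)) = p
  obtain ⟨hA1, hI1, hmo1, hsub1⟩ := pvPhase1 order pairs o h
  set order1 := if order.contains o then order else order.insert o () with hord1
  rw [hA1]
  obtain ⟨hA2, hI2, hmd, hsub2⟩ := pvPhase1 order1 pairs d hI1
  set order2 := if order1.contains d then order1 else order1.insert d () with hord2
  rw [hA2]
  have hmo2 : o ∈ order2.keys := hsub2 hmo1
  have hndk2 : (pvDictEmit order2 pairs).keys.Nodup := by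
    rw [pvDictEmit_keys _ _ hI2]; exact hI2.1
  have hinner : (pvDictEmit order2 pairs).getD o PySem.Dict.empty =
      pvInner o pairs.items PySem.Dict.empty :=
    PySem.Dict.getD_of_mem_items _
      (by rw [pvDictEmit_items _ _ hI2]; exact List.mem_map_of_mem hmo2) hndk2 _
  rw [hinner]
  obtain ⟨hndO2, hndP, hP⟩ := hI2
  rcases hget : pairs.get? (pvPairKey o d) with _ | v
  · have hcontf : pairs.contains (pvPairKey o d) = false := by
      rw [PySem.Dict.contains_eq_isSome_get?, hget]; rfl
    have hnotin : pvPairKey o d ∉ pairs.items.map (·.1) := by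
      have h1 := (PySem.Dict.get?_eq_none_iff_not_mem_keys pairs (pvPairKey o d)).mp hget
      simpa [PySem.Dict.keys] using h1
    have hcd : (pvInner o pairs.items PySem.Dict.empty).get? d = none := by
      rw [pvInner_get?_of_not_mem o d pairs.items _ (fun it hit => (hP it hit).1) hnotin]
      exact PySem.Dict.get?_empty _
    have hcdc : (pvInner o pairs.items PySem.Dict.empty).contains d = false := by
      rw [PySem.Dict.contains_eq_isSome_get?, hcd]; rfl
    rw [if_neg (by rw [hcdc]; simp)]
    rw [if_pos (Or.inl (by rw [hcontf]; simp))]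
    constructor
    · rw [← hinner]
      show pvEmitStep (pvDictEmit order2 pairs) ((o, d), p) = _
      exact pvWrite_fresh order2 pairs o d p ⟨hndO2, hndP, hP⟩ hmo2 hmd hcontf
    · exact pvInv_insert_pair order2 pairs o d p ⟨hndO2, hndP, hP⟩ hmo2 hmd
  · have hcd : (pvInner o pairs.items PySem.Dict.empty).get? d = some v :=
      pvInner_get?_of_mem o d v pairs.items _ (fun it hit => (hP it hit).1) hndP
        (PySem.Dict.mem_items_of_get?_eq_some pairs hget)
    have hcdc : (pvInner o pairs.items PySem.Dict.empty).contains d = true := by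
      rw [PySem.Dict.contains_eq_isSome_get?, hcd]; rfl
    have hgd : (pvInner o pairs.items PySem.Dict.empty).getD d 0 = v := by
      rw [PySem.Dict.getD_eq_get?_getD, hcd]; rfl
    have hcont : pairs.contains (pvPairKey o d) = true := by
      rw [PySem.Dict.contains_eq_isSome_get?, hget]; rfl
    have hgdp : pairs.getD (pvPairKey o d) 0 = v := by
      rw [PySem.Dict.getD_eq_get?_getD, hget]; rfl
    by_cases hpv : p > v
    · rw [if_pos ⟨hcdc, by rw [hgd]; exact hpv⟩]
      rw [if_neg (by rw [hcont, hgdp]; simp; omega)]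
      exact ⟨rfl, hndO2, hndP, hP⟩
    · rw [if_neg (fun hcon => hpv (hgd ▸ hcon.2))]
      by_cases hlt : p < v
      · rw [if_pos (Or.inr (by rw [hgdp]; exact hlt))]
        constructor
        · rw [← hinner]
          show pvEmitStep (pvDictEmit order2 pairs) ((o, d), p) = _
          exact pvWrite_update order2 pairs o d p v ⟨hndO2, hndP, hP⟩ hmo2 hmd hget
        · exact pvInv_insert_pair order2 pairs o d p ⟨hndO2, hndP, hP⟩ hmo2 hmd
      · have hpev : p = v := le_antisymm (not_lt.mp hpv) (not_lt.mp hlt)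
        rw [if_neg (by rw [hcont, hgdp]; simp; omega)]
        constructor
        · rw [← hinner]
          show pvEmitStep (pvDictEmit order2 pairs) ((o, d), p) = _
          rw [pvWrite_update order2 pairs o d p v ⟨hndO2, hndP, hP⟩ hmo2 hmd hget, hpev,
            pv_insert_same pairs _ v hndP hget]
        · exact ⟨hndO2, hndP, hP⟩

theorem pvFold_main (ruas : List String) (order : PySem.Dict String Unit)
    (pairs : PySem.Dict (String × String) Int) (h : pvInv order pairs) :
    ruas.foldl pvStepA (pvDictEmit order pairs) =
      pvDictEmit (ruas.foldl pvStepB (order, pairs)).1 (ruas.foldl pvStepB (order, pairs)).2 ∧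
    pvInv (ruas.foldl pvStepB (order, pairs)).1 (ruas.foldl pvStepB (order, pairs)).2 := by
  induction ruas generalizing order pairs with
  | nil => exact ⟨rfl, h⟩
  | cons r rs ih =>
    obtain ⟨h1, h2⟩ := pvStep_main order pairs r h
    have := ih (pvStepB (order, pairs) r).1 (pvStepB (order, pairs) r).2 h2
    simpa [List.foldl_cons, h1] using this


-- ===== characterization layer: the (order, table) pair equals B's declarative form =====

def pvCanon (od : String × String) : String × String := pvPairKey od.1 od.2

def pvKeyList (ends : List (String × String)) : List (String × String) :=
  pvFirstSeen (ends.map pvCanon)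

def pvMinv (ruas : List String) (k : String × String) : Option Int :=
  ruas.foldl (fun acc r =>
    if pvCanon (pvEndsOf r) = k then
      some (match acc with
            | none => ((r.toList.length : Int))
            | some m => min m ((r.toList.length : Int)))
    else acc) none

def pvOther (x : String) (kv : (String × String) × Int) : Option (String × Int) :=
  if kv.1.1 = x then some (kv.1.2, kv.2)
  else if kv.1.2 = x then some (kv.1.1, kv.2) else none

def pvOther1 (x : String) (k : String × String) : Option String :=
  if k.1 = x then some k.2 else if k.2 = x then some k.1 else none

theorem mem_pvFS {α : Type} [DecidableEq α] (acc : List α) (v a : α) :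
    a ∈ pvFS acc v ↔ a ∈ acc ∨ a = v := by
  unfold pvFS; split_ifs with h
  · constructor
    · exact Or.inl
    · rintro (h1 | rfl) <;> [exact h1; exact h]
  · simp

theorem mem_foldl_pvFS {α : Type} [DecidableEq α] (xs acc : List α) (a : α) :
    a ∈ xs.foldl pvFS acc ↔ a ∈ acc ∨ a ∈ xs := by
  induction xs generalizing acc with
  | nil => simp
  | cons x xs ih =>
    rw [List.foldl_cons, ih, mem_pvFS]
    simp [or_assoc]

theorem mem_pvFirstSeen {α : Type} [DecidableEq α] (xs : List α) (a : α) :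
    a ∈ pvFirstSeen xs ↔ a ∈ xs := by
  unfold pvFirstSeen; rw [mem_foldl_pvFS]; simp

theorem nodup_pvFS {α : Type} [DecidableEq α] (acc : List α) (v : α) (h : acc.Nodup) :
    (pvFS acc v).Nodup := by
  unfold pvFS; split_ifs with hv
  · exact h
  · simp [List.nodup_append, h]
    intro a ha hav; exact hv (hav ▸ ha)

theorem nodup_foldl_pvFS {α : Type} [DecidableEq α] (xs acc : List α) (h : acc.Nodup) :
    (xs.foldl pvFS acc).Nodup := by
  induction xs generalizing acc with
  | nil => exact h
  | cons x xs ih => exact ih _ (nodup_pvFS acc x h)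

theorem nodup_pvFirstSeen {α : Type} [DecidableEq α] (xs : List α) : (pvFirstSeen xs).Nodup :=
  nodup_foldl_pvFS xs [] (by simp)

theorem pvFirstSeen_append {α : Type} [DecidableEq α] (xs : List α) (v : α) :
    pvFirstSeen (xs ++ [v]) = pvFS (pvFirstSeen xs) v := by
  unfold pvFirstSeen; rw [List.foldl_append]; rfl

-- (S1) the first component of the fold records exactly the first-seen endpoint order
theorem pvOrderKeys (ruas : List String) (order : PySem.Dict String Unit)
    (pairs : PySem.Dict (String × String) Int) :
    ((ruas.foldl pvStepB (order, pairs)).1).keys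
      = (ruas.map pvEndsOf).foldl (fun acc od => pvFS (pvFS acc od.1) od.2) order.keys := by
  induction ruas generalizing order pairs with
  | nil => rfl
  | cons r rs ih =>
    rw [List.foldl_cons, List.map_cons, List.foldl_cons]
    have hstep : ∀ (d0 : PySem.Dict String Unit) (v : String),
        (if d0.contains v then d0 else d0.insert v ()).keys = pvFS d0.keys v := by
      intro d0 v
      by_cases hc : d0.contains v = true
      · rw [if_pos hc]
        unfold pvFS
        rw [if_pos ((PySem.Dict.contains_iff_mem_keys _ _).mp hc)]
      · have hc2 : d0.contains v = false := by simpa using hc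
        rw [if_neg (by simp [hc2]), PySem.Dict.keys_insert_of_not_contains d0 () hc2]
        unfold pvFS
        rw [if_neg (fun hm => by
          rw [(PySem.Dict.contains_iff_mem_keys _ _).mpr hm] at hc2; cases hc2)]
    have hfst : (pvStepB (order, pairs) r).1 =
        (if (if order.contains (pvEndsOf r).1 then order
             else order.insert (pvEndsOf r).1 ()).contains (pvEndsOf r).2
         then (if order.contains (pvEndsOf r).1 then order else order.insert (pvEndsOf r).1 ())
         else (if order.contains (pvEndsOf r).1 then order
               else order.insert (pvEndsOf r).1 ()).insert (pvEndsOf r).2 ()) := rfl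
    rw [show pvStepB (order, pairs) r
        = ((pvStepB (order, pairs) r).1, (pvStepB (order, pairs) r).2) from rfl,
      ih ((pvStepB (order, pairs) r).1) ((pvStepB (order, pairs) r).2), hfst, hstep, hstep]

-- (S1') pvNodes as the same two-step fold
theorem pvNodes_foldl_aux (ends : List (String × String)) (acc : List String) :
    (ends.flatMap (fun od => [od.1, od.2])).foldl pvFS acc
      = ends.foldl (fun a od => pvFS (pvFS a od.1) od.2) acc := by
  induction ends generalizing acc with
  | nil => rfl
  | cons e es ih =>
    rw [List.flatMap_cons, List.foldl_append, List.foldl_cons]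
    exact ih _

theorem pvNodes_foldl (ends : List (String × String)) :
    pvNodes ends = ends.foldl (fun a od => pvFS (pvFS a od.1) od.2) [] := by
  unfold pvNodes pvFirstSeen
  exact pvNodes_foldl_aux ends []

theorem pvMinv_append (rs : List String) (r : String) (k : String × String) :
    pvMinv (rs ++ [r]) k =
      if pvCanon (pvEndsOf r) = k then
        some (match pvMinv rs k with
              | none => ((r.toList.length : Int))
              | some m => min m ((r.toList.length : Int)))
      else pvMinv rs k := by
  unfold pvMinv; rw [List.foldl_append]; rfl

theorem pvMinv_none_iff (rs : List String) (k : String × String) :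
    pvMinv rs k = none ↔ ∀ r ∈ rs, pvCanon (pvEndsOf r) ≠ k := by
  induction rs using List.reverseRecOn with
  | nil => simp [pvMinv]
  | append_singleton rs r ih =>
    rw [pvMinv_append]
    by_cases h : pvCanon (pvEndsOf r) = k
    · rw [if_pos h]
      refine ⟨fun hc => by simp at hc, fun h1 => absurd h (h1 r (by simp))⟩
    · rw [if_neg h, ih]
      constructor
      · intro h1 a ha
        rcases List.mem_append.mp ha with h2 | h2
        · exact h1 a h2
        · rw [List.mem_singleton] at h2; subst h2; exact h
      · intro h1 a ha; exact h1 a (List.mem_append_left _ ha)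

theorem pvKeyList_append (ends : List (String × String)) (e : String × String) :
    pvKeyList (ends ++ [e]) = pvFS (pvKeyList ends) (pvCanon e) := by
  unfold pvKeyList
  rw [List.map_append, List.map_singleton, pvFirstSeen_append]

theorem pvKeyList_canon (ends : List (String × String)) (k : String × String)
    (hk : k ∈ pvKeyList ends) : k.1 ≤ k.2 := by
  rw [pvKeyList, mem_pvFirstSeen] at hk
  rcases List.mem_map.mp hk with ⟨od, _, hod⟩
  rw [← hod]
  exact pvPairKey_norm od.1 od.2

-- (S2) the table is: canonical keys in first-seen order, each with its running minimum
theorem pvPairsItems (ruas : List String) :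
    ((ruas.foldl pvStepB (PySem.Dict.empty, PySem.Dict.empty)).2).items
      = (pvKeyList (ruas.map pvEndsOf)).map
          (fun k => (k, (pvMinv ruas k).getD 0)) := by
  induction ruas using List.reverseRecOn with
  | nil => rfl
  | append_singleton rs r ih =>
    rw [List.foldl_append, List.foldl_cons, List.foldl_nil]
    set st := rs.foldl pvStepB (PySem.Dict.empty, PySem.Dict.empty) with hst
    set KL := pvKeyList (rs.map pvEndsOf) with hKL
    have hkeys : st.2.keys = KL := by
      show st.2.items.map (·.1) = KL
      rw [ih, List.map_map]
      exact (List.map_congr_left (fun a _ => rfl)).trans (List.map_id _)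
    have hndKL : KL.Nodup := nodup_pvFirstSeen _
    have hndk : st.2.keys.Nodup := by rw [hkeys]; exact hndKL
    set k := pvCanon (pvEndsOf r) with hk
    have hsnd : (pvStepB st r).2 =
        (if ¬ st.2.contains k ∨ ((r.toList.length : Int)) < st.2.getD k 0
         then st.2.insert k ((r.toList.length : Int)) else st.2) := rfl
    have hKL' : pvKeyList ((rs ++ [r]).map pvEndsOf) = pvFS KL k := by
      rw [List.map_append, List.map_singleton, pvKeyList_append]
    have hcont : st.2.contains k = decide (k ∈ KL) := by
      rw [PySem.Dict.contains_eq_decide_mem_keys, hkeys]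
    by_cases hmem : k ∈ KL
    · -- existing pair: in-place min update (or no-op)
      have hsome : (pvMinv rs k).isSome := by
        rcases h : pvMinv rs k with _ | m
        · rw [pvMinv_none_iff] at h
          rw [hKL, pvKeyList, mem_pvFirstSeen] at hmem
          rcases List.mem_map.mp hmem with ⟨od, hod, hodk⟩
          rcases List.mem_map.mp hod with ⟨r', hr', hre⟩
          exact absurd (by rw [hre, hodk]) (h r' hr')
        · rfl
      rcases hm : pvMinv rs k with _ | m
      · rw [hm] at hsome; cases hsome
      have hitem : (k, m) ∈ st.2.items := by
        rw [ih]
        have := List.mem_map_of_mem (f := fun k' => (k', (pvMinv rs k').getD 0)) hmem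
        simpa [hm] using this
      have hgd : st.2.getD k 0 = m := PySem.Dict.getD_of_mem_items st.2 hitem hndk 0
      have hKLeq : pvKeyList ((rs ++ [r]).map pvEndsOf) = KL := by
        rw [hKL']; unfold pvFS; rw [if_pos hmem]
      rw [hKLeq]
      have hmap : ∀ k' ∈ KL, (fun k'' => (k'', (pvMinv (rs ++ [r]) k'').getD 0)) k'
          = (if k' = k then (k, (if ((r.toList.length : Int)) < m
                then ((r.toList.length : Int)) else m))
             else (k', (pvMinv rs k').getD 0)) := by
        intro k' _
        show (k', (pvMinv (rs ++ [r]) k').getD 0) = _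
        by_cases hk' : k' = k
        · subst hk'
          rw [pvMinv_append, if_pos rfl, hm]
          simp only [Option.getD_some]
          congr 1
          rcases lt_or_ge ((r.toList.length : Int)) m with h1 | h1
          · rw [if_pos h1, min_eq_right (le_of_lt h1)]
          · rw [if_neg (not_lt.mpr h1), min_eq_left h1]
        · have hne : ¬ (pvCanon (pvEndsOf r) = k') := fun hc => hk' (hk.trans hc).symm
          rw [pvMinv_append, if_neg hne, if_neg hk']
      by_cases hlt : ((r.toList.length : Int)) < m
      · rw [hsnd, if_pos (Or.inr (by rw [hgd]; exact hlt))]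
        have hck : st.2.contains k = true := by rw [hcont]; simpa using hmem
        rw [pvRep_items st.2 k _ hck, ih, List.map_map]
        rw [List.map_congr_left hmap]
        refine List.map_congr_left ?_
        intro k' hk'
        show pvRep k ((r.toList.length : Int)) (k', (pvMinv rs k').getD 0)
            = (if k' = k then (k, (if ((r.toList.length : Int)) < m
                  then ((r.toList.length : Int)) else m))
               else (k', (pvMinv rs k').getD 0))
        by_cases h1 : k' = k
        · subst h1
          rw [if_pos rfl, if_pos hlt]
          unfold pvRep
          rw [if_pos (by simp)]
        · rw [if_neg h1]
          unfold pvRep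
          rw [if_neg (by simpa using h1)]
      · have hle := not_lt.mp hlt
        have hcond : ¬ (¬ st.2.contains k = true ∨ ((r.toList.length : Int)) < st.2.getD k 0) := by
          rw [hgd, hcont]
          simp [hmem]
          simpa using hle
        rw [hsnd, if_neg hcond, ih]
        rw [List.map_congr_left hmap]
        refine List.map_congr_left ?_
        intro k' hk'
        show (k', (pvMinv rs k').getD 0)
            = (if k' = k then (k, (if ((r.toList.length : Int)) < m
                  then ((r.toList.length : Int)) else m))
               else (k', (pvMinv rs k').getD 0))
        by_cases h1 : k' = k
        · subst h1
          rw [if_pos rfl, if_neg hlt, hm]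
          rfl
        · rw [if_neg h1]
    · -- fresh pair: appended at the end with its own length
      have hck : st.2.contains k = false := by rw [hcont]; simpa using hmem
      rw [hsnd, if_pos (Or.inl (by rw [hck]; simp)),
        PySem.Dict.items_insert_of_not_contains _ _ hck, ih, hKL']
      have hKL2 : pvFS KL k = KL ++ [k] := by unfold pvFS; rw [if_neg hmem]
      rw [hKL2, List.map_append, List.map_singleton]
      congr 1
      · refine List.map_congr_left ?_
        intro k' hk'
        show (k', (pvMinv rs k').getD 0) = (k', (pvMinv (rs ++ [r]) k').getD 0)
        have hne : pvCanon (pvEndsOf r) ≠ k' := fun hc => hmem (by rw [hk, hc]; exact hk')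
        rw [pvMinv_append, if_neg hne]
      · have hnone : pvMinv rs k = none := by
          rw [pvMinv_none_iff]
          intro r' hr' hc
          apply hmem
          show k ∈ pvFirstSeen ((rs.map pvEndsOf).map pvCanon)
          rw [mem_pvFirstSeen, ← hc]
          exact List.mem_map_of_mem (List.mem_map_of_mem hr')
        rw [pvMinv_append, if_pos rfl, hnone]
        rfl

-- (S3) the per-node inner dict built by emission, as a filterMap
theorem pvWr_eq_other (x : String) (kv : (String × String) × Int) (w : PySem.Dict String Int) :
    pvWr kv.1.1 kv.1.2 kv.2 x w =
      (match pvOther x kv with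
       | none => w
       | some yp => w.insert yp.1 yp.2) := by
  unfold pvWr pvOther
  by_cases h1 : kv.1.1 = x
  · rw [if_pos h1, if_pos h1]
  · rw [if_neg h1, if_neg h1]
    by_cases h2 : kv.1.2 = x
    · rw [if_pos h2, if_pos h2]
    · rw [if_neg h2, if_neg h2]

theorem pvInner_items_filterMap (x : String) (T : List ((String × String) × Int))
    (w : PySem.Dict String Int)
    (hnd : (w.keys ++ (T.filterMap (pvOther x)).map (·.1)).Nodup) :
    (pvInner x T w).items = w.items ++ T.filterMap (pvOther x) := by
  induction T generalizing w with
  | nil => simp [pvInner]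
  | cons kv T' ih =>
    rw [pvInner_cons, pvWr_eq_other]
    rcases ho : pvOther x kv with _ | yp
    · rw [List.filterMap_cons_none ho] at hnd ⊢
      exact ih w hnd
    · rw [List.filterMap_cons_some ho] at hnd ⊢
      have hy : yp.1 ∉ w.keys := by
        rw [List.nodup_append] at hnd
        exact fun hm => hnd.2.2 _ hm _ (by simp) rfl
      have hcy : w.contains yp.1 = false := by
        rw [PySem.Dict.contains_eq_decide_mem_keys]; simpa using hy
      have hkeys : (w.insert yp.1 yp.2).keys = w.keys ++ [yp.1] :=
        PySem.Dict.keys_insert_of_not_contains w yp.2 hcy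
      have hnd' : ((w.insert yp.1 yp.2).keys ++ (T'.filterMap (pvOther x)).map (·.1)).Nodup := by
        rw [hkeys, List.append_assoc, List.singleton_append]
        exact hnd
      have := ih (w.insert yp.1 yp.2) hnd'
      rw [show (w.insert yp.1 yp.2) = (match (some yp : Option (String × Int)) with
            | none => w | some yp => w.insert yp.1 yp.2) from rfl] at this
      rw [this, PySem.Dict.items_insert_of_not_contains _ _ hcy, List.append_assoc,
        List.singleton_append]

theorem pvOther1_canon (x y : String) (k : String × String) (hc : k.1 ≤ k.2)
    (h : pvOther1 x k = some y) : k = pvPairKey x y := by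
  unfold pvOther1 at h
  by_cases h1 : k.1 = x
  · rw [if_pos h1] at h
    have hy : k.2 = y := by injection h
    have hxy : x ≤ y := by rw [← h1, ← hy]; exact hc
    rw [pvPairKey_of_le hxy, ← h1, ← hy]
  · rw [if_neg h1] at h
    by_cases h2 : k.2 = x
    · rw [if_pos h2] at h
      have hy : k.1 = y := by injection h
      have hyx : y ≤ x := by rw [← hy, ← h2]; exact hc
      have hne : y ≠ x := fun hcq => h1 (hy.trans hcq)
      have hnxy : ¬ x ≤ y := fun hxy => hne (le_antisymm hyx hxy)
      unfold pvPairKey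
      rw [if_neg hnxy, ← hy, ← h2]
    · rw [if_neg h2] at h; cases h

theorem pvOther_map_f (x : String) (KL : List (String × String)) (g : String × String → Int)
    (hc : ∀ k ∈ KL, k.1 ≤ k.2) :
    (KL.map (fun k => (k, g k))).filterMap (pvOther x)
      = (KL.filterMap (pvOther1 x)).map (fun y => (y, g (pvPairKey x y))) := by
  induction KL with
  | nil => rfl
  | cons k KL' ih =>
    rw [List.map_cons]
    rcases h1 : pvOther1 x k with _ | y
    · have h2 : pvOther x (k, g k) = none := by
        unfold pvOther; unfold pvOther1 at h1
        by_cases ha : k.1 = x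
        · rw [if_pos ha] at h1; cases h1
        · rw [if_neg ha] at h1
          by_cases hb : k.2 = x
          · rw [if_pos hb] at h1; cases h1
          · rw [if_neg ha, if_neg hb]
      rw [List.filterMap_cons_none h2, List.filterMap_cons_none h1]
      exact ih (fun k' hk' => hc k' (List.mem_cons_of_mem _ hk'))
    · have hkey : k = pvPairKey x y := pvOther1_canon x y k (hc k List.mem_cons_self) h1
      have h2 : pvOther x (k, g k) = some (y, g k) := by
        unfold pvOther; unfold pvOther1 at h1
        by_cases ha : k.1 = x
        · rw [if_pos ha] at h1; rw [if_pos ha]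
          injection h1 with h1; rw [h1]
        · rw [if_neg ha] at h1
          by_cases hb : k.2 = x
          · rw [if_pos hb] at h1; rw [if_neg ha, if_pos hb]
            injection h1 with h1; rw [h1]
          · rw [if_neg hb] at h1; cases h1
      rw [List.filterMap_cons_some h2, List.filterMap_cons_some h1, List.map_cons,
        ← hkey]
      rw [ih (fun k' hk' => hc k' (List.mem_cons_of_mem _ hk'))]

-- dedup commutes with the partial selection (selected canonical keys are determined by their image)
theorem pvFS_filterMap_other (x : String) (L : List (String × String)) :
    ∀ (acc : List (String × String)), (∀ a ∈ L, a.1 ≤ a.2) → (∀ a ∈ acc, a.1 ≤ a.2) →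
    (L.foldl pvFS acc).filterMap (pvOther1 x)
      = (L.filterMap (pvOther1 x)).foldl pvFS (acc.filterMap (pvOther1 x)) := by
  induction L with
  | nil => intro acc _ _; rfl
  | cons a L' ih =>
    intro acc hcL hcA
    have hca : a.1 ≤ a.2 := hcL a List.mem_cons_self
    have hcL' : ∀ b ∈ L', b.1 ≤ b.2 := fun b hb => hcL b (List.mem_cons_of_mem _ hb)
    have hcA' : ∀ b ∈ pvFS acc a, b.1 ≤ b.2 := by
      intro b hb
      rcases (mem_pvFS acc a b).mp hb with h | h
      · exact hcA b h
      · exact h ▸ hca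
    rw [List.foldl_cons]
    rcases h1 : pvOther1 x a with _ | y
    · have hacc : (pvFS acc a).filterMap (pvOther1 x) = acc.filterMap (pvOther1 x) := by
        unfold pvFS; split_ifs
        · rfl
        · rw [List.filterMap_append, List.filterMap_cons_none h1, List.filterMap_nil,
            List.append_nil]
      rw [List.filterMap_cons_none h1, ih (pvFS acc a) hcL' hcA', hacc]
    · have hkey : a = pvPairKey x y := pvOther1_canon x y a hca h1
      have hiff : a ∈ acc ↔ y ∈ acc.filterMap (pvOther1 x) := by
        constructor
        · intro h; exact List.mem_filterMap.mpr ⟨a, h, h1⟩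
        · intro h
          rcases List.mem_filterMap.mp h with ⟨a', ha', h1'⟩
          have : a' = pvPairKey x y := pvOther1_canon x y a' (hcA a' ha') h1'
          rw [hkey, ← this]
          exact ha'
      have hacc : (pvFS acc a).filterMap (pvOther1 x)
          = pvFS (acc.filterMap (pvOther1 x)) y := by
        unfold pvFS
        by_cases hm : a ∈ acc
        · rw [if_pos hm, if_pos (hiff.mp hm)]
        · rw [if_neg hm, if_neg (fun hy => hm (hiff.mpr hy)), List.filterMap_append,
            List.filterMap_cons_some h1, List.filterMap_nil]
      rw [List.filterMap_cons_some h1, List.foldl_cons, ih (pvFS acc a) hcL' hcA', hacc]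

-- the selected neighbour of a canonical pair is the plain "other endpoint" selector of B
theorem pvOther1_canon_eval (x : String) (od : String × String) :
    pvOther1 x (pvCanon od)
      = (if od.1 = x ∨ od.2 = x then some (if od.1 = x then od.2 else od.1) else none) := by
  unfold pvCanon pvPairKey pvOther1
  by_cases hle : od.1 ≤ od.2
  · rw [if_pos hle]
    by_cases h1 : od.1 = x
    · simp [h1]
    · by_cases h2 : od.2 = x <;> simp [h1, h2]
  · rw [if_neg hle]
    by_cases h2 : od.2 = x
    · have h1 : od.1 ≠ x := fun hc => hle (le_of_eq (hc.trans h2.symm))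
      simp [h1, h2]
    · by_cases h1 : od.1 = x <;> simp [h1, h2]

theorem pvKeyList_filterMap_neigh (x : String) (ends : List (String × String)) :
    (pvKeyList ends).filterMap (pvOther1 x) = pvNeighbours ends x := by
  unfold pvKeyList pvFirstSeen pvNeighbours
  rw [pvFS_filterMap_other x (ends.map pvCanon) []
      (by intro a ha
          rcases List.mem_map.mp ha with ⟨od, _, hod⟩
          rw [← hod]; exact pvPairKey_norm od.1 od.2)
      (by intro a ha; cases ha)]
  rw [List.filterMap_nil, List.filterMap_map]
  have hsel := List.filterMap_congr (l := ends) (f := pvOther1 x ∘ pvCanon)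
      (g := fun od => if od.1 = x ∨ od.2 = x then some (if od.1 = x then od.2 else od.1) else none)
      (fun od _ => pvOther1_canon_eval x od)
  rw [hsel]
  rfl

theorem nodup_filterMap_other (x : String) (KL : List (String × String))
    (hc : ∀ k ∈ KL, k.1 ≤ k.2) (hnd : KL.Nodup) : (KL.filterMap (pvOther1 x)).Nodup := by
  induction KL with
  | nil => simp
  | cons k KL' ih =>
    have hndt := (List.nodup_cons.mp hnd).2
    have hk := (List.nodup_cons.mp hnd).1
    rcases h1 : pvOther1 x k with _ | y
    · rw [List.filterMap_cons_none h1]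
      exact ih (fun k' hk' => hc k' (List.mem_cons_of_mem _ hk')) hndt
    · rw [List.filterMap_cons_some h1, List.nodup_cons]
      refine ⟨?_, ih (fun k' hk' => hc k' (List.mem_cons_of_mem _ hk')) hndt⟩
      intro hy
      rcases List.mem_filterMap.mp hy with ⟨k', hk'm, h1'⟩
      have e1 : k = pvPairKey x y := pvOther1_canon x y k (hc k List.mem_cons_self) h1
      have e2 : k' = pvPairKey x y :=
        pvOther1_canon x y k' (hc k' (List.mem_cons_of_mem _ hk'm)) h1'
      exact hk (by rw [e1, ← e2]; exact hk'm)

-- canonical keys agree with B's unordered endpoint test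
theorem pvCanon_eq_pairKey_iff (o d x y : String) :
    pvCanon (o, d) = pvPairKey x y ↔ ((o = x ∧ d = y) ∨ (o = y ∧ d = x)) := by
  constructor
  · intro h
    have ho : pvCanon (o, d) = (o, d) ∨ pvCanon (o, d) = (d, o) := by
      unfold pvCanon pvPairKey; split_ifs <;> simp
    have hx : pvPairKey x y = (x, y) ∨ pvPairKey x y = (y, x) := by
      unfold pvPairKey; split_ifs <;> simp
    rcases ho with ho | ho <;> rcases hx with hx | hx <;>
      rw [ho, hx] at h <;> obtain ⟨h1, h2⟩ := Prod.mk.injEq .. ▸ h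
    · exact Or.inl ⟨h1, h2⟩
    · exact Or.inr ⟨h1, h2⟩
    · exact Or.inr ⟨h2, h1⟩
    · exact Or.inl ⟨h2, h1⟩
  · rintro (⟨rfl, rfl⟩ | ⟨rfl, rfl⟩)
    · rfl
    · show pvPairKey o d = pvPairKey d o
      exact pvPairKey_comm o d

-- the running minimum is Python's min() over the matching lengths
theorem pvMinv_eq_min (rs : List String) (k : String × String) :
    pvMinv rs k =
      (match rs.filterMap (fun r => if pvCanon (pvEndsOf r) = k
            then some ((r.toList.length : Int)) else none) with
       | [] => none
       | c :: t => some (t.foldl min c)) := by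
  induction rs using List.reverseRecOn with
  | nil => rfl
  | append_singleton rs r ih =>
    rw [pvMinv_append, List.filterMap_append]
    by_cases h : pvCanon (pvEndsOf r) = k
    · rw [if_pos h, List.filterMap_cons, if_pos h, List.filterMap_nil, ih]
      rcases hc : rs.filterMap (fun r => if pvCanon (pvEndsOf r) = k
          then some ((r.toList.length : Int)) else none) with _ | ⟨c, t⟩
      · rfl
      · show some (min (t.foldl min c) _) = some ((t ++ [(r.toList.length : Int)]).foldl min c)
        rw [List.foldl_append, List.foldl_cons, List.foldl_nil]
    · rw [if_neg h, List.filterMap_cons, if_neg h, List.filterMap_nil, List.append_nil, ih]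

theorem pvZipSelf (l : List String) :
    l.zip (l.map pvEndsOf) = l.map (fun r => (r, pvEndsOf r)) := by
  induction l with
  | nil => rfl
  | cons a t ih => simp [ih]

theorem pvShortest_eq_minv (ruas : List String) (x y : String)
    (hne : ∃ r ∈ ruas, pvCanon (pvEndsOf r) = pvPairKey x y) :
    (pvMinv ruas (pvPairKey x y)).getD 0 = pvShortest ruas (ruas.map pvEndsOf) x y := by
  unfold pvShortest
  rw [pvZipSelf ruas, List.filterMap_map]
  have hsel : ∀ r : String,
      ((fun rp : String × (String × String) =>
          if (rp.2.1 = x ∧ rp.2.2 = y) ∨ (rp.2.1 = y ∧ rp.2.2 = x)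
          then some ((rp.1.toList.length : Int)) else none) ∘ (fun r => (r, pvEndsOf r))) r
        = (if pvCanon (pvEndsOf r) = pvPairKey x y
           then some ((r.toList.length : Int)) else none) := by
    intro r
    show (if ((pvEndsOf r).1 = x ∧ (pvEndsOf r).2 = y) ∨ ((pvEndsOf r).1 = y ∧ (pvEndsOf r).2 = x)
          then some ((r.toList.length : Int)) else none) = _
    by_cases h : pvCanon (pvEndsOf r) = pvPairKey x y
    · rw [if_pos h,
        if_pos ((pvCanon_eq_pairKey_iff (pvEndsOf r).1 (pvEndsOf r).2 x y).mp h)]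
    · rw [if_neg h,
        if_neg (fun hc => h ((pvCanon_eq_pairKey_iff (pvEndsOf r).1 (pvEndsOf r).2 x y).mpr hc))]
  rw [List.filterMap_congr (fun r _ => hsel r), pvMinv_eq_min]
  rcases hc : ruas.filterMap (fun r => if pvCanon (pvEndsOf r) = pvPairKey x y
      then some ((r.toList.length : Int)) else none) with _ | ⟨c, t⟩
  · obtain ⟨r, hr, hcr⟩ := hne
    have : ((r.toList.length : Int)) ∈ ruas.filterMap (fun r =>
        if pvCanon (pvEndsOf r) = pvPairKey x y
        then some ((r.toList.length : Int)) else none) :=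
      List.mem_filterMap.mpr ⟨r, hr, by rw [if_pos hcr]⟩
    rw [hc] at this
    cases this
  · rw [PySem.List.min?_id_cons]


-- ===== VERDICT (by name: the statement is the Claim_ definition above) =====
theorem build_spec : Claim_equal_build := by
  intro ruas _ _
  unfold Spec_build
  have h0 : pvInv PySem.Dict.empty PySem.Dict.empty := by
    refine ⟨by simp, by simp [PySem.Dict.empty], ?_⟩
    intro it hit; simp [PySem.Dict.empty] at hit
  obtain ⟨hfold, hinv⟩ := pvFold_main ruas PySem.Dict.empty PySem.Dict.empty h0
  have hbase : pvDictEmit PySem.Dict.empty PySem.Dict.empty = PySem.Dict.empty := rfl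
  rw [hbase] at hfold
  set st := ruas.foldl pvStepB (PySem.Dict.empty, PySem.Dict.empty) with hst
  set ends := ruas.map pvEndsOf with hends
  set KL := pvKeyList ends with hKL
  have hcanon : ∀ k ∈ KL, k.1 ≤ k.2 := fun k hk => pvKeyList_canon ends k hk
  have hndKL : KL.Nodup := nodup_pvFirstSeen _
  have hnd1 : ∀ x : String, (KL.filterMap (pvOther1 x)).Nodup :=
    fun x => nodup_filterMap_other x KL hcanon hndKL
  have hitems : st.2.items = KL.map (fun k => (k, (pvMinv ruas k).getD 0)) := pvPairsItems ruas
  have hkeys : st.1.keys = pvNodes ends := by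
    rw [pvOrderKeys ruas PySem.Dict.empty PySem.Dict.empty, pvNodes_foldl]
    rfl
  unfold build build_alt
  rw [hfold, pvDictEmit_items st.1 st.2 hinv, List.map_map, hkeys]
  refine List.map_congr_left ?_
  intro x hx
  show (x, (pvInner x st.2.items PySem.Dict.empty).items)
      = (x, (pvNeighbours ends x).map (fun y => (y, pvShortest ruas ends x y)))
  congr 1
  rw [hitems]
  have hmapfst : ((KL.filterMap (pvOther1 x)).map
      ((fun q : String × Int => q.1) ∘ (fun y => (y, (pvMinv ruas (pvPairKey x y)).getD 0))))
        = KL.filterMap (pvOther1 x) :=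
    (List.map_congr_left (fun a _ => rfl)).trans (List.map_id _)
  have hndflt : (((PySem.Dict.empty : PySem.Dict String Int)).keys
      ++ (((KL.map (fun k => (k, (pvMinv ruas k).getD 0))).filterMap (pvOther x)).map (·.1))).Nodup := by
    show (([] : List String) ++ _).Nodup
    rw [List.nil_append, pvOther_map_f x KL _ hcanon, List.map_map, hmapfst]
    exact hnd1 x
  rw [pvInner_items_filterMap x _ _ hndflt, pvOther_map_f x KL _ hcanon,
    pvKeyList_filterMap_neigh x ends]
  show ([] : List (String × Int)) ++ _ = _
  rw [List.nil_append]
  refine List.map_congr_left ?_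
  intro y hy
  have hy0 : y ∈ pvFirstSeen (ends.filterMap (fun od =>
      if od.1 = x ∨ od.2 = x then some (if od.1 = x then od.2 else od.1) else none)) := hy
  have hy' := (mem_pvFirstSeen _ _).mp hy0
  rcases List.mem_filterMap.mp hy' with ⟨od, hod, hsel⟩
  have hod' : od ∈ ruas.map pvEndsOf := by rw [← hends]; exact hod
  rcases List.mem_map.mp hod' with ⟨r, hr, hre⟩
  have h1 : pvOther1 x (pvCanon od) = some y := by rw [pvOther1_canon_eval]; exact hsel
  have h2 : pvCanon od = pvPairKey x y :=
    pvOther1_canon x y (pvCanon od) (pvPairKey_norm od.1 od.2) h1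
  have hex : ∃ r' ∈ ruas, pvCanon (pvEndsOf r') = pvPairKey x y :=
    ⟨r, hr, by rw [hre]; exact h2⟩
  show (y, (pvMinv ruas (pvPairKey x y)).getD 0) = (y, pvShortest ruas ends x y)
  rw [pvShortest_eq_minv ruas x y hex]
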